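-- pv_equiv track=rewrite | github.com/dmlerner/grind75plus | extra/maximal-rectangle.py | get_h
-- ===== SOURCE A (Python) =====
-- def get_h(rectangle):
--     R, C = len(rectangle), len(rectangle[0])
--     h = [[0] * C for r in range(R)]
--     for r in range(R):
--         for c in range(C - 1, -1, -1):
--             if rectangle[r][c] == '1':
--                 h[r][c] = 1
--                 try:
--                     h[r][c] += h[r][c+1]
--                 except IndexError:
--                     pass
--
--     return h
-- ===== SOURCE B (Python) =====
-- def get_h(rectangle):
--     C = len(rectangle[0])
--     out = []
--     for row in rectangle:
--         vals = []
--         i = 0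
--         while i < C:
--             ch = row[i]
--             j = i + 1
--             while j < C and row[j] == ch:
--                 j += 1
--             if ch == '1':
--                 vals.extend(range(j - i, 0, -1))
--             else:
--                 vals.extend([0] * (j - i))
--             i = j
--         out.append(vals)
--     return out
-- ===== Notes on version B (the rewrite author's own statement) =====
-- stated objective: alternative
-- what changed: A scans each row backwards cell by cell, incrementing from the already-computed right neighbour via try/except; B scans forwards, splitting the row into maximal equal-character runs and emitting the descending counts L..1 for a '1'-run (zeros otherwise) in one go.
import Mathlib
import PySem

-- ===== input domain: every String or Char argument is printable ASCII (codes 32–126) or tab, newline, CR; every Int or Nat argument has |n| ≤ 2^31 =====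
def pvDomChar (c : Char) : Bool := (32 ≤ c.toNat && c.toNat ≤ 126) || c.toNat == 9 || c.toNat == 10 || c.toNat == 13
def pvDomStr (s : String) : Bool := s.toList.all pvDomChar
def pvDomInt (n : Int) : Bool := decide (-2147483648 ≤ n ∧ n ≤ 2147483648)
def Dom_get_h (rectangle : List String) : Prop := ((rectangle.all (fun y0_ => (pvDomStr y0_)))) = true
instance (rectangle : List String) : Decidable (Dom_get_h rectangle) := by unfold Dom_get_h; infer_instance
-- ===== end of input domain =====

-- B replaces A's backward per-cell scan (with try/except) by a forward split of each
-- row into maximal equal-character runs, emitting L..1 for a '1'-run of length L and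
-- zeros otherwise (objective: alternative decomposition, same cost).

-- ===== PORT A =====
-- literal port of A: for each row, fold over range(C-1,-1,-1) updating a zero list;
-- rectangle[r][c] is Str.pyGet? (in range under Pre_); the try/except around h[r][c+1]
-- becomes (pyGet? h (c+1)).getD 0; c is nonnegative in the range so c.toNat is exact.
def get_h (rectangle : List String) : List (List Int) :=
  let C : Nat := (rectangle.headD "").toList.length
  rectangle.map (fun row =>
    (PySem.List.pyRange ((C : Int) - 1) (-1) (-1)).foldl
      (fun h c =>
        if PySem.Str.pyGet? row c = some '1' then
          h.set c.toNat (1 + (PySem.List.pyGet? h (c + 1)).getD 0)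
        else h)
      (List.replicate C (0 : Int)))

-- ===== PORT B =====
-- inner 'while j < C and row[j] == ch: j += 1' of Source B
def runEnd (chars : List Char) (C : Nat) (ch : Char) (j : Nat) : Nat :=
  if h : j < C ∧ chars.getD j ' ' = ch then runEnd chars C ch (j + 1) else j
  termination_by C - j
  decreasing_by omega

theorem le_runEnd (chars : List Char) (C : Nat) (ch : Char) (j : Nat) :
    j ≤ runEnd chars C ch j := by
  unfold runEnd
  split
  · exact le_trans (Nat.le_succ j) (le_runEnd chars C ch (j + 1))
  · exact le_rfl
  termination_by C - j
  decreasing_by omega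

-- outer 'while i < C' loop of Source B
def scanB (chars : List Char) (C : Nat) (i : Nat) : List Int :=
  if _hi : i < C then
    let ch := chars.getD i ' '
    let j := runEnd chars C ch (i + 1)
    (if ch = '1' then PySem.List.pyRange ((j - i : Nat) : Int) 0 (-1)
     else List.replicate (j - i) (0 : Int)) ++ scanB chars C j
  else []
  termination_by C - i
  decreasing_by
    have := le_runEnd chars C (chars.getD i ' ') (i + 1)
    omega

def get_h_alt (rectangle : List String) : List (List Int) :=
  let C : Nat := (rectangle.headD "").toList.length
  rectangle.map (fun row => scanB row.toList C 0)

-- ===== PRECONDITION & SPEC =====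
-- Pre_ excludes exactly the inputs where A raises IndexError: the empty list
-- (rectangle[0]) and rows shorter than the first row (rectangle[r][c]).
def Pre_get_h (rectangle : List String) : Prop :=
  rectangle ≠ [] ∧
    ∀ s ∈ rectangle, (rectangle.headD "").toList.length ≤ s.toList.length
instance (rectangle : List String) : Decidable (Pre_get_h rectangle) := by
  unfold Pre_get_h; infer_instance
def pvWitness_get_h : List String := ["10110", "11011"]

def Spec_get_h (rectangle : List String) (out : List (List Int)) : Prop := out = get_h_alt rectangle
instance (rectangle : List String) (out : List (List Int)) : Decidable (Spec_get_h rectangle out) := by unfold Spec_get_h; infer_instance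

-- ===== CLAIM (what is proved, stated in full; the proofs are below) =====
def Claim_equal_get_h : Prop := ∀ (rectangle : List String), Dom_get_h rectangle → Pre_get_h rectangle → Spec_get_h rectangle (get_h rectangle)

-- ===== LEMMAS AND PROOFS =====

-- length of the maximal run of '1's starting at c (within the first C chars)
def rc (chars : List Char) (C c : Nat) : Int :=
  if c < C ∧ chars.getD c ' ' = '1' then 1 + rc chars C (c + 1) else 0
  termination_by C - c
  decreasing_by omega

theorem rc_zero (chars : List Char) (C c : Nat)
    (h : ¬ (c < C ∧ chars.getD c ' ' = '1')) : rc chars C c = 0 := by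
  rw [rc, if_neg h]

theorem rc_pos (chars : List Char) (C c : Nat)
    (h1 : c < C) (h2 : chars.getD c ' ' = '1') :
    rc chars C c = 1 + rc chars C (c + 1) := by
  rw [rc, if_pos ⟨h1, h2⟩]

theorem runEnd_le (chars : List Char) (C : Nat) (ch : Char) (j : Nat)
    (h : j ≤ C) : runEnd chars C ch j ≤ C := by
  unfold runEnd
  split
  · exact runEnd_le chars C ch (j + 1) (by omega)
  · exact h
  termination_by C - j
  decreasing_by omega

theorem runEnd_mem (chars : List Char) (C : Nat) (ch : Char) (j : Nat) :
    ∀ k, j ≤ k → k < runEnd chars C ch j → chars.getD k ' ' = ch := by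
  intro k hjk hk
  rw [runEnd] at hk
  split at hk
  · next hc =>
    rcases Nat.eq_or_lt_of_le hjk with h | h
    · subst h; exact hc.2
    · exact runEnd_mem chars C ch (j + 1) k h hk
  · omega
  termination_by C - j
  decreasing_by omega

theorem runEnd_stop (chars : List Char) (C : Nat) (ch : Char) (j : Nat) :
    runEnd chars C ch j < C → chars.getD (runEnd chars C ch j) ' ' ≠ ch := by
  rw [runEnd]
  split
  · exact runEnd_stop chars C ch (j + 1)
  · next hc => intro h he; exact hc ⟨h, he⟩
  termination_by C - j
  decreasing_by omega

-- inside a run of '1's ending (exclusively) at j, rc counts down to j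
theorem rc_run (chars : List Char) (C : Nat) (j : Nat)
    (hj : rc chars C j = 0)
    (k : Nat) (hkj : k ≤ j) (hjC : j ≤ C)
    (hrun : ∀ t, k ≤ t → t < j → chars.getD t ' ' = '1') :
    rc chars C k = (j : Int) - k := by
  rcases Nat.eq_or_lt_of_le hkj with h | h
  · subst h; rw [hj]; ring
  · have h1 : chars.getD k ' ' = '1' := hrun k le_rfl h
    have := rc_run chars C j hj (k + 1) (by omega) hjC
      (fun t ht1 ht2 => hrun t (by omega) ht2)
    rw [rc_pos chars C k (by omega) h1, this]
    push_cast; ring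
  termination_by j - k
  decreasing_by omega

theorem scanB_eq (chars : List Char) (C i : Nat) :
    scanB chars C i = (List.range' i (C - i)).map (rc chars C) := by
  rw [scanB]
  split
  · next hi =>
    dsimp only
    have hij : i + 1 ≤ runEnd chars C (chars.getD i ' ') (i + 1) :=
      le_runEnd chars C (chars.getD i ' ') (i + 1)
    have hjC : runEnd chars C (chars.getD i ' ') (i + 1) ≤ C :=
      runEnd_le chars C (chars.getD i ' ') (i + 1) (by omega)
    set ch := chars.getD i ' ' with hch
    set j := runEnd chars C ch (i + 1) with hjdef
    have hIH := scanB_eq chars C j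
    have hrun : ∀ t, i ≤ t → t < j → chars.getD t ' ' = ch := by
      intro t ht1 ht2
      rcases Nat.eq_or_lt_of_le ht1 with h | h
      · subst h; rfl
      · exact runEnd_mem chars C ch (i + 1) t (by omega) ht2
    have hsplit : List.range' i (C - i) = List.range' i (j - i) ++ List.range' j (C - j) := by
      have h := List.range'_append (s := i) (m := j - i) (n := C - j) (step := 1)
      have e1 : i + 1 * (j - i) = j := by omega
      have e2 : (j - i) + (C - j) = C - i := by omega
      rw [e1, e2] at h
      exact h.symm
    rw [hsplit, List.map_append, hIH]
    congr 1
    have hrcj : rc chars C j = 0 ∨ chars.getD j ' ' ≠ ch := by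
      by_cases hjC' : j < C
      · exact Or.inr (runEnd_stop chars C ch (i + 1) (hjdef ▸ hjC'))
      · exact Or.inl (rc_zero chars C j (by omega))
    split
    · next hone =>
      have hj0 : rc chars C j = 0 := by
        rcases hrcj with h | h
        · exact h
        · exact rc_zero chars C j (by rw [hone] at h; tauto)
      rw [PySem.List.pyRange_neg_one, List.range'_eq_map_range, List.map_map]
      have hn : ((j - i : Nat) : Int) - 0 = ((j - i : Nat) : Int) := by ring
      rw [hn, Int.toNat_natCast]
      symm
      apply List.map_congr_left
      intro k hk
      rw [List.mem_range] at hk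
      have hrck : rc chars C (i + k) = (j : Int) - (i + k) :=
        rc_run chars C j hj0 (i + k) (by omega) hjC
          (fun t ht1 ht2 => (hrun t (by omega) ht2).trans hone)
      simp only [Function.comp_apply, hrck]
      omega
    · next hone =>
      have hall : ∀ x ∈ (List.range' i (j - i)).map (rc chars C), x = 0 := by
        intro x hx
        rw [List.mem_map] at hx
        obtain ⟨t, ht, rfl⟩ := hx
        rw [List.mem_range'_1] at ht
        refine rc_zero chars C t ?_
        rintro ⟨_, h1⟩
        exact hone ((hrun t ht.1 (by omega)).symm.trans h1)
      have := List.eq_replicate_of_mem hall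
      rw [this]
      simp
  · next hi =>
    have h0 : C - i = 0 := by omega
    simp [h0]
  termination_by C - i
  decreasing_by omega

-- invariant of A's backward fold over one row
theorem foldA (row : String) (C : Nat) (hC : C ≤ row.toList.length) :
    ∀ (m : Nat) (h0 : List Int), m ≤ C → h0.length = C →
      (∀ k, k < C → h0.getD k 0 = if m ≤ k then rc row.toList C k else 0) →
      (PySem.List.pyRange ((m : Int) - 1) (-1) (-1)).foldl
        (fun h c =>
          if PySem.Str.pyGet? row c = some '1' then
            h.set c.toNat (1 + (PySem.List.pyGet? h (c + 1)).getD 0)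
          else h)
        h0
      = (List.range C).map (rc row.toList C) := by
  intro m
  induction m with
  | zero =>
    intro h0 _ hlen hinv
    rw [PySem.List.pyRange_neg_one_eq_nil (by norm_num)]
    simp only [List.foldl_nil]
    apply List.ext_getElem (by simp [hlen])
    intro k hk1 hk2
    have hkC : k < C := by simpa [hlen] using hk1
    have := hinv k hkC
    rw [if_pos (Nat.zero_le k)] at this
    rw [List.getD_eq_getElem h0 0 hk1] at this
    simp [this]
  | succ m ih =>
    intro h0 hm hlen hinv
    have hcast : ((m + 1 : Nat) : Int) - 1 = (m : Nat) := by push_cast; ring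
    rw [hcast, PySem.List.pyRange_neg_one_cons (by omega), List.foldl_cons]
    have hmC : m < C := by omega
    have hmrow : m < row.toList.length := by omega
    have hget : PySem.Str.pyGet? row (m : Nat) = some (row.toList.getD m ' ') := by
      rw [PySem.Str.pyGet?_natCast, List.getElem?_eq_getElem hmrow,
        List.getD_eq_getElem _ _ hmrow]
    have hread : (PySem.List.pyGet? h0 ((m : Nat) + 1)).getD 0 = rc row.toList C (m + 1) := by
      have : ((m : Int) + 1) = ((m + 1 : Nat) : Int) := by push_cast; ring
      rw [this, PySem.List.pyGet?_natCast]
      by_cases hm1 : m + 1 < C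
      · have hlt : m + 1 < h0.length := by omega
        rw [List.getElem?_eq_getElem hlt]
        have := hinv (m + 1) hm1
        rw [if_pos le_rfl, List.getD_eq_getElem h0 0 hlt] at this
        simpa using this
      · have : h0[m+1]? = none := by
          rw [List.getElem?_eq_none_iff]; omega
        rw [this]
        simp [rc_zero row.toList C (m + 1) (by omega)]
    by_cases hone : row.toList.getD m ' ' = '1'
    · rw [if_pos (by rw [hget, hone]), Int.toNat_natCast, hread]
      apply ih _ (by omega) (by simp [hlen])
      intro k hkC'
      by_cases hkm : k = m
      · subst hkm
        rw [List.getD_eq_getElem _ 0 (by simp [hlen]; omega),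
          List.getElem_set, if_pos rfl, if_pos le_rfl, rc_pos row.toList C k hmC hone]
      · have hset : (h0.set m (1 + rc row.toList C (m + 1))).getD k 0 = h0.getD k 0 := by
          by_cases hkl : k < h0.length
          · rw [List.getD_eq_getElem _ 0 (by simpa using hkl),
              List.getElem_set, if_neg (by omega), List.getD_eq_getElem _ 0 hkl]
          · rw [List.getD_eq_default _ _ (by simpa using Nat.le_of_not_lt hkl),
              List.getD_eq_default _ _ (Nat.le_of_not_lt hkl)]
        rw [hset, hinv k hkC']
        by_cases h : m ≤ k
        · rw [if_pos (by omega), if_pos h]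
        · rw [if_neg (by omega), if_neg h]
    · rw [if_neg (by rw [hget]; simpa using hone)]
      apply ih _ (by omega) hlen
      intro k hkC'
      rw [hinv k hkC']
      by_cases hkm : k = m
      · subst hkm
        rw [if_neg (by omega), if_pos le_rfl,
          rc_zero row.toList C k (by tauto)]
      · by_cases h : m ≤ k
        · rw [if_pos (by omega), if_pos h]
        · rw [if_neg (by omega), if_neg h]

-- ===== VERDICT (by name: the statement is the Claim_ definition above) =====
theorem get_h_spec : Claim_equal_get_h := by
  intro rect _ hpre
  unfold Spec_get_h get_h get_h_alt
  dsimp only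
  apply List.map_congr_left
  intro row hrow
  have hC : (rect.headD "").toList.length ≤ row.toList.length := hpre.2 row hrow
  set C := (rect.headD "").toList.length with hCdef
  have hinit : ∀ k, k < C → (List.replicate C (0 : Int)).getD k 0 = if C ≤ k then rc row.toList C k else 0 := by
    intro k hk
    rw [List.getD_eq_getElem _ _ (by simpa using hk), List.getElem_replicate, if_neg (by omega)]
  rw [foldA row C hC C (List.replicate C 0) le_rfl (by simp) hinit,
    scanB_eq, Nat.sub_zero, ← List.range_eq_range']
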